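-- pv_equiv track=rewrite | github.com/trvds/FP_Projeto2 | projeto.py | obter_posicoes_adjacentes
-- ===== SOURCE A (Python) =====
-- def cria_posicao(col, ln):  # str x str -> posicao
--     """
--     Recebe duas cadeias de carateres correspondentes a coluna c
--     e a linha l de uma posicao e devolve a posicao correspondente, se ambos os
--     argumentos forem validos.
--     :param col: Coluna, pode ser 'a', 'b' ou 'c'
--     :param ln: Linha, pode ser '1', '2' ou '3'
--     :return: Posicao do tabuleiro, representada por um tuplo com dois elementos,
--     o primeiro sendo a coluna e o segundo a linha, que sao ambos inteiros de 0 a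
--     2, dependendo da posicao que se quer representar.
--     """
--     if col == 'a':
--         col = 0
--     elif col == 'b':
--         col = 1
--     elif col == 'c':
--         col = 2
--     else:
--         raise ValueError('cria_posicao: argumentos invalidos')
--     if ln == '1':
--         ln = 0
--     elif ln == '2':
--         ln = 1
--     elif ln == '3':
--         ln = 2
--     else:
--         raise ValueError('cria_posicao: argumentos invalidos')
--     return col, ln
--
-- def obter_str_colunas():  # {} -> tuplo com strings das colunas
--     """
--     Fornece um tuplo com as strings dos indices das colunas.
--     :return: ('a', 'b', 'c')
--     """
--     return 'a', 'b', 'c'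
--
-- def obter_str_linhas():  # {} -> tuplo com strings das colunas
--     """
--     Fornece um tuplo com as strings dos indices das linhas.
--     :return: ('1', '2', '3')
--     """
--     return '1', '2', '3'
--
-- def posicoes():  # {} -> tuplo com str de posicoes
--     """
--     Devolve todas as posicoes de um tabuleiro
--     :return: tuplo com posicoes
--     """
--     str_pos = ()
--     for linha in obter_str_linhas():
--         for coluna in obter_str_colunas():
--             str_pos += (coluna, linha),
--     return str_pos
--
-- def obter_posicoes_adjacentes(pos):  # posicao -> tuplo de posicoes
--     """
--     Indica as posicoes adjacentes a posicao introduzida.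
--     :param pos: posicao
--     :return: tuplo com as posicoes adjacentes
--     """
--     posis_str = posicoes()  # tuplo com as posicoes em string
--     posis = () # tuplo com as posicoes(ordem:a1, b1, c1, a2, b2, c2, a3, b3, c3)
--     for pos_str in posis_str:
--         posis += cria_posicao(pos_str[0], pos_str[1]),
--     retorno = ()
--     if pos == posis[1] or pos == posis[3] or pos == posis[4]:  # pos: b1, a2, b2
--         retorno += posis[0],                                   # adjacente: a1
--     if pos == posis[0] or pos == posis[2] or pos == posis[4]:  # pos: a1, c1, b2
--         retorno += posis[1],                                   # adjacente: b1
--     if pos == posis[1] or pos == posis[4] or pos == posis[5]:  # pos: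
--         retorno += posis[2],                                   # adjacente: c1
--     if pos == posis[0] or pos == posis[4] or pos == posis[6]:  # pos: a1, c1, b2
--         retorno += posis[3],                                   # adjacente: a2
--     if pos in posis and pos != posis[4]:                       # pos: todas
--         retorno += posis[4],                                   # adjacente: b2
--     if pos == posis[2] or pos == posis[4] or pos == posis[8]:  # pos: c1, b2, c3
--         retorno += posis[5],                                   # adjacente: c2
--     if pos == posis[3] or pos == posis[4] or pos == posis[7]:  # pos: a2, b2, b3
--         retorno += posis[6],                                   # adjacente: a3
--     if pos == posis[4] or pos == posis[6] or pos == posis[8]:  # pos: b2, a3, c3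
--         retorno += posis[7],                                   # adjacente: b3
--     if pos == posis[4] or pos == posis[5] or pos == posis[7]:  # pos: b2, c2, b3
--         retorno += posis[8],                                   # adjacente: c3
--     return retorno
-- ===== SOURCE B (Python) =====
-- def obter_posicoes_adjacentes(pos):  # posicao -> tuplo de posicoes
--     """Adjacencias computadas a partir das coordenadas: vizinhos ortogonais,
--     mais a regra de o centro ser adjacente a todas as posicoes."""
--     board = tuple((c, l) for l in range(3) for c in range(3))
--     if pos not in board:
--         return ()
--     center = (1, 1)
--     return tuple(p for p in board
--                  if p != pos and (pos == center or p == center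
--                                   or abs(p[0] - pos[0]) + abs(p[1] - pos[1]) == 1))
-- ===== Notes on version B (the rewrite author's own statement) =====
-- stated objective: simpler
-- what changed: Replaced the nine hard-coded per-cell comparison blocks with a single filter over the board using a coordinate adjacency predicate (orthogonal neighbour, or the centre is involved), after a membership guard for invalid positions.
import Mathlib
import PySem

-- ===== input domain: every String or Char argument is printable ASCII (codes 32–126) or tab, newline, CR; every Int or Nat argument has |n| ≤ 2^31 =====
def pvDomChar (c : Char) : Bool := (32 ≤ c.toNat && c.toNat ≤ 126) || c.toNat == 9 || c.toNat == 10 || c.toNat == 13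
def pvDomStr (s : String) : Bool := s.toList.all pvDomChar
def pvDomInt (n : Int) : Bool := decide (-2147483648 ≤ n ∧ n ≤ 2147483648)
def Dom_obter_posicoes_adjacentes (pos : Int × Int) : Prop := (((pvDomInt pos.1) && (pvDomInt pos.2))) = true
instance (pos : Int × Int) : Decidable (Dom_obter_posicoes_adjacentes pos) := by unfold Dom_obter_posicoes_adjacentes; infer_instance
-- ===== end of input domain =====

-- B replaces A's nine hard-coded comparison blocks by one pass over the board with a
-- coordinate adjacency predicate (orthogonal neighbour, or centre involved); objective: simpler.

-- ===== PORT A =====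
-- cria_posicao raises ValueError on invalid arguments -> none (never reached from posicoes()).
def cria_posicao (col ln : String) : Option (Int × Int) :=
  (if col = "a" then some (0 : Int)
   else if col = "b" then some 1
   else if col = "c" then some 2
   else none).bind fun c =>
  (if ln = "1" then some (0 : Int)
   else if ln = "2" then some 1
   else if ln = "3" then some 2
   else none).bind fun l =>
  some (c, l)

def obter_str_colunas : List String := ["a", "b", "c"]

def obter_str_linhas : List String := ["1", "2", "3"]

def posicoes : List (String × String) :=
  obter_str_linhas.foldl (fun str_pos linha =>
    obter_str_colunas.foldl (fun str_pos coluna => str_pos ++ [(coluna, linha)]) str_pos) []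

def obter_posicoes_adjacentes (pos : Int × Int) : List (Int × Int) :=
  -- cria_posicao never fails on posicoes() output, so .getD is exact here
  let posis := posicoes.foldl (fun posis ps => posis ++ [(cria_posicao ps.1 ps.2).getD (0, 0)]) []
  -- posis has 9 elements, so every index below is in range and .getD is exact
  let g := fun (i : Int) => (PySem.List.pyGet? posis i).getD (0, 0)
  let retorno : List (Int × Int) := []
  let retorno := if pos = g 1 ∨ pos = g 3 ∨ pos = g 4 then retorno ++ [g 0] else retorno
  let retorno := if pos = g 0 ∨ pos = g 2 ∨ pos = g 4 then retorno ++ [g 1] else retorno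
  let retorno := if pos = g 1 ∨ pos = g 4 ∨ pos = g 5 then retorno ++ [g 2] else retorno
  let retorno := if pos = g 0 ∨ pos = g 4 ∨ pos = g 6 then retorno ++ [g 3] else retorno
  let retorno := if pos ∈ posis ∧ pos ≠ g 4 then retorno ++ [g 4] else retorno
  let retorno := if pos = g 2 ∨ pos = g 4 ∨ pos = g 8 then retorno ++ [g 5] else retorno
  let retorno := if pos = g 3 ∨ pos = g 4 ∨ pos = g 7 then retorno ++ [g 6] else retorno
  let retorno := if pos = g 4 ∨ pos = g 6 ∨ pos = g 8 then retorno ++ [g 7] else retorno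
  let retorno := if pos = g 4 ∨ pos = g 5 ∨ pos = g 7 then retorno ++ [g 8] else retorno
  retorno

-- ===== PORT B =====
def pvBoard : List (Int × Int) :=
  (PySem.List.pyRange 0 3 1).flatMap fun l => (PySem.List.pyRange 0 3 1).map fun c => (c, l)

def obter_posicoes_adjacentes_alt (pos : Int × Int) : List (Int × Int) :=
  if pos ∈ pvBoard then
    pvBoard.filter fun p =>
      decide (p ≠ pos ∧ (pos = ((1 : Int), (1 : Int)) ∨ p = ((1 : Int), (1 : Int)) ∨
        (p.1 - pos.1).natAbs + (p.2 - pos.2).natAbs = 1))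
  else []

-- ===== PRECONDITION & SPEC =====
def Spec_obter_posicoes_adjacentes (pos : Int × Int) (out : List (Int × Int)) : Prop := out = obter_posicoes_adjacentes_alt pos
instance (pos : Int × Int) (out : List (Int × Int)) : Decidable (Spec_obter_posicoes_adjacentes pos out) := by unfold Spec_obter_posicoes_adjacentes; infer_instance

-- ===== CLAIM (what is proved, stated in full; the proofs are below) =====
def Claim_equal_obter_posicoes_adjacentes : Prop := ∀ (pos : Int × Int), Dom_obter_posicoes_adjacentes pos → Spec_obter_posicoes_adjacentes pos (obter_posicoes_adjacentes pos)

-- ===== LEMMAS AND PROOFS =====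

lemma pvBoard_eq :
    pvBoard = [(0,0), (1,0), (2,0), (0,1), (1,1), (2,1), (0,2), (1,2), (2,2)] := by decide

lemma outside_B {pos : Int × Int} (h : pos ∉ pvBoard) :
    obter_posicoes_adjacentes_alt pos = [] := by
  simp [obter_posicoes_adjacentes_alt, h]

lemma outside_A {pos : Int × Int} (h : pos ∉ pvBoard) :
    obter_posicoes_adjacentes pos = [] := by
  rw [pvBoard_eq] at h
  have h9 : pos ≠ (0,0) ∧ pos ≠ (1,0) ∧ pos ≠ (2,0) ∧ pos ≠ (0,1) ∧ pos ≠ (1,1) ∧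
      pos ≠ (2,1) ∧ pos ≠ (0,2) ∧ pos ≠ (1,2) ∧ pos ≠ (2,2) := by
    simp only [List.mem_cons, List.not_mem_nil, or_false, not_or] at h
    exact ⟨h.1, h.2.1, h.2.2.1, h.2.2.2.1, h.2.2.2.2.1, h.2.2.2.2.2.1, h.2.2.2.2.2.2.1,
      h.2.2.2.2.2.2.2.1, h.2.2.2.2.2.2.2.2⟩
  obtain ⟨h0, h1, h2, h3, h4, h5, h6, h7, h8⟩ := h9
  simp [obter_posicoes_adjacentes, posicoes, obter_str_colunas, obter_str_linhas,
    cria_posicao, PySem.List.pyGet?, PySem.List.pyIdx?, List.foldl,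
    h0, h1, h2, h3, h4, h5, h6, h7, h8]

-- ===== VERDICT (by name: the statement is the Claim_ definition above) =====
theorem obter_posicoes_adjacentes_spec : Claim_equal_obter_posicoes_adjacentes := by
  intro pos _
  unfold Spec_obter_posicoes_adjacentes
  by_cases h : pos ∈ pvBoard
  · rw [pvBoard_eq, List.mem_cons, List.mem_cons, List.mem_cons, List.mem_cons, List.mem_cons,
      List.mem_cons, List.mem_cons, List.mem_cons, List.mem_cons] at h
    rcases h with rfl | rfl | rfl | rfl | rfl | rfl | rfl | rfl | rfl | h
    · decide
    · decide
    · decide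
    · decide
    · decide
    · decide
    · decide
    · decide
    · decide
    · exact absurd h (List.not_mem_nil)
  · rw [outside_A h, outside_B h]
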